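-- pv_equiv track=rewrite | github.com/xushengwang/JUMPspecLib | consensusLibrary/unimod_resources/RTfunctions.py | clusteringSliding
-- ===== SOURCE A (Python) =====
-- def clusteringSliding(points, eps=1):
--     clusters = []
--     points_sorted = sorted(points)
--     curr_point = points_sorted[0]
--     curr_cluster = [curr_point]
--     for point in points_sorted[1:]:
--         if point <= curr_point + eps:
--             curr_cluster.append(point)
--         else:
--             clusters.append(curr_cluster)
--             curr_cluster = [point]
--         curr_point = point
--     clusters.append(curr_cluster)
--     return clusters
-- ===== SOURCE B (Python) =====
-- def clusteringSliding(points, eps=1):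
--     # Staged decomposition: (1) boolean gap flags between sorted neighbours,
--     # (2) run-length-encode them into cluster sizes, (3) cut the sorted list
--     # into slices of those sizes.  No cluster is built during the scan.
--     s = sorted(points)
--     if not s:
--         return []
--     gaps = [p > q + eps for q, p in zip(s, s[1:])]
--     sizes = []
--     run = 1
--     for g in gaps:
--         if g:
--             sizes.append(run)
--             run = 1
--         else:
--             run += 1
--     sizes.append(run)
--     out = []
--     rest = s
--     for k in sizes:
--         out.append(rest[:k])
--         rest = rest[k:]
--     return out
-- ===== Notes on version B (the rewrite author's own statement) =====
-- stated objective: alternative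
-- what changed: B replaces A's single pass that builds clusters with three staged passes over the sorted list: compute the boolean neighbour-gap list, run-length-encode it into cluster sizes, then cut the sorted list into slices of those sizes.
-- outside the precondition, e.g. on clusteringSliding([], 1): A raises IndexError, B returns []
import Mathlib
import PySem

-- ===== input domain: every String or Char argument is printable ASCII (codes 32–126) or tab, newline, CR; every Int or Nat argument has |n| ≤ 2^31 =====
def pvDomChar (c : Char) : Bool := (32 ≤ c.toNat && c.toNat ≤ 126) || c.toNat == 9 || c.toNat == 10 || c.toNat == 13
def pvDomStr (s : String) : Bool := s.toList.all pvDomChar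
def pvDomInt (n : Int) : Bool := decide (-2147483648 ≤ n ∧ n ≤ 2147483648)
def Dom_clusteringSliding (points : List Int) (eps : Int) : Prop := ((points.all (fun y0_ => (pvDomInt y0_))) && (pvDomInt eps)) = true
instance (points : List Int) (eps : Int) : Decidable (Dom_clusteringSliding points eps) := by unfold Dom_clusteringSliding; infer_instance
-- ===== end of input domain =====

-- B is an alternative staged decomposition: gap flags → run-length sizes → slicing,
-- instead of A's single pass building clusters directly.
-- A raises IndexError on empty input (excluded by Pre_); B returns [] there.

-- ===== PORT A =====
-- the for-loop of A, with its state (clusters, curr_cluster, curr_point)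
def pvALoop (eps : Int) (rest : List Int) (clusters : List (List Int))
    (curr_cluster : List Int) (curr_point : Int) : List (List Int) :=
  match rest with
  | [] => clusters ++ [curr_cluster]
  | p :: rest' =>
      if p ≤ curr_point + eps then pvALoop eps rest' clusters (curr_cluster ++ [p]) p
      else pvALoop eps rest' (clusters ++ [curr_cluster]) [p] p

def clusteringSliding (points : List Int) (eps : Int) : List (List Int) :=
  match PySem.List.sorted points (fun x => x) false with
  | [] => []   -- Python: points_sorted[0] raises IndexError here; excluded by Pre_
  | h :: t => pvALoop eps t [] [h] h

-- ===== PORT B =====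
-- gaps = [p > q + eps for q, p in zip(s, s[1:])]
def pvGapsB (eps : Int) (s : List Int) : List Bool :=
  (s.zip (PySem.List.slice s (some 1) none)).map (fun qp => decide (qp.1 + eps < qp.2))

-- one step of the run-length loop over the gap flags; state = (sizes, run)
def pvSizesStep (st : List Int × Int) (g : Bool) : List Int × Int :=
  if g then (st.1 ++ [st.2], 1) else (st.1, st.2 + 1)

-- one step of the cutting loop; state = (out, rest): out.append(rest[:k]); rest = rest[k:]
def pvCutStep (st : List (List Int) × List Int) (k : Int) : List (List Int) × List Int :=
  (st.1 ++ [PySem.List.slice st.2 none (some k)], PySem.List.slice st.2 (some k) none)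

def clusteringSliding_alt (points : List Int) (eps : Int) : List (List Int) :=
  let s := PySem.List.sorted points (fun x => x) false
  if s = [] then []
  else
    let sr := (pvGapsB eps s).foldl pvSizesStep ([], 1)
    let sizes := sr.1 ++ [sr.2]
    (sizes.foldl pvCutStep ([], s)).1

-- ===== PRECONDITION & SPEC =====
def Pre_clusteringSliding (points : List Int) (eps : Int) : Prop := points ≠ []
instance (points : List Int) (eps : Int) : Decidable (Pre_clusteringSliding points eps) := by
  unfold Pre_clusteringSliding; infer_instance

def pvWitness_clusteringSliding : List Int × Int := ([3, 1, 2, 7], 1)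

def Spec_clusteringSliding (points : List Int) (eps : Int) (out : List (List Int)) : Prop :=
  out = clusteringSliding_alt points eps
instance (points : List Int) (eps : Int) (out : List (List Int)) : Decidable (Spec_clusteringSliding points eps out) := by
  unfold Spec_clusteringSliding; infer_instance

-- ===== CLAIM (what is proved, stated in full; the proofs are below) =====
def Claim_equal_clusteringSliding : Prop := ∀ (points : List Int) (eps : Int), Dom_clusteringSliding points eps → Pre_clusteringSliding points eps → Spec_clusteringSliding points eps (clusteringSliding points eps)

-- ===== LEMMAS AND PROOFS =====

-- structural form of the gap-flag list
def pvGapsR (eps : Int) : List Int → List Bool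
  | p :: q :: t => decide (p + eps < q) :: pvGapsR eps (q :: t)
  | _ => []

-- structural form of the run-length sizes: remaining flags, pending run
def pvSizesF : List Bool → Int → List Int
  | [], run => [run]
  | true :: gs, run => run :: pvSizesF gs 1
  | false :: gs, run => pvSizesF gs (run + 1)

-- structural form of the cutting loop
def pvCutR : List Int → List Int → List (List Int)
  | _, [] => []
  | rest, k :: ks =>
      PySem.List.slice rest none (some k) :: pvCutR (PySem.List.slice rest (some k) none) ks

-- reference splitter: cut a list at the true flags
def pvConsHead (p : Int) : List (List Int) → List (List Int)
  | [] => [[p]]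
  | c :: cs => (p :: c) :: cs

def pvSplitF : List Int → List Bool → List (List Int)
  | [], _ => []
  | p :: _, [] => [[p]]
  | p :: t, true :: gs => [p] :: pvSplitF t gs
  | p :: t, false :: gs => pvConsHead p (pvSplitF t gs)

def pvAddFirst : List Int → List Int
  | [] => []
  | k :: ks => (k + 1) :: ks

theorem pvGapsB_eq (eps : Int) (s : List Int) : pvGapsB eps s = pvGapsR eps s := by
  unfold pvGapsB
  rw [PySem.List.slice_from_one]
  induction s with
  | nil => rfl
  | cons p t ih =>
    cases t with
    | nil => rfl
    | cons q t' =>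
      simp only [List.tail_cons] at ih ⊢
      simp only [List.zip_cons_cons, List.map_cons, pvGapsR]
      exact congrArg _ ih

theorem pvGapsR_length (eps : Int) (s : List Int) (hs : s ≠ []) :
    (pvGapsR eps s).length + 1 = s.length := by
  induction s with
  | nil => exact absurd rfl hs
  | cons p t ih =>
    cases t with
    | nil => rfl
    | cons q t' =>
      have := ih (by simp)
      simp only [pvGapsR, List.length_cons] at this ⊢
      omega

theorem pvSizes_foldl (gs : List Bool) : ∀ (acc : List Int) (run : Int),
    (gs.foldl pvSizesStep (acc, run)).1 ++ [(gs.foldl pvSizesStep (acc, run)).2]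
      = acc ++ pvSizesF gs run := by
  induction gs with
  | nil => intro acc run; simp [pvSizesF]
  | cons g gs ih =>
    intro acc run
    cases g <;> simp [pvSizesStep, pvSizesF, ih]

theorem pvCut_foldl (ks : List Int) : ∀ (out : List (List Int)) (rest : List Int),
    (ks.foldl pvCutStep (out, rest)).1 = out ++ pvCutR rest ks := by
  induction ks with
  | nil => intro out rest; simp [pvCutR]
  | cons k ks ih =>
    intro out rest
    simp only [List.foldl_cons, pvCutStep, pvCutR]
    rw [ih]; simp

theorem pvSizesF_succ (gs : List Bool) : ∀ (run : Int),
    pvSizesF gs (run + 1) = pvAddFirst (pvSizesF gs run) := by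
  induction gs with
  | nil => intro run; rfl
  | cons g gs ih =>
    intro run
    cases g with
    | true => rfl
    | false => simp only [pvSizesF]; rw [ih]

theorem pvSizesF_head (gs : List Bool) : ∀ (run : Int),
    ∃ (m : Nat) (ks : List Int), pvSizesF gs run = (run + (m : Int)) :: ks := by
  induction gs with
  | nil => intro run; exact ⟨0, [], by simp [pvSizesF]⟩
  | cons g gs ih =>
    intro run
    cases g with
    | true => exact ⟨0, pvSizesF gs 1, by simp [pvSizesF]⟩
    | false =>
      obtain ⟨m, ks, h⟩ := ih (run + 1)
      exact ⟨m + 1, ks, by simp only [pvSizesF]; rw [h]; congr 1; push_cast; ring⟩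

theorem pvSplitF_shape (p : Int) (t : List Int) (gs : List Bool) :
    ∃ r cs, pvSplitF (p :: t) gs = (p :: r) :: cs := by
  induction t generalizing p gs with
  | nil =>
    cases gs with
    | nil => exact ⟨[], [], rfl⟩
    | cons g gs => cases g <;> exact ⟨[], _, rfl⟩
  | cons q t' ih =>
    cases gs with
    | nil => exact ⟨[], [], rfl⟩
    | cons g gs =>
      cases g with
      | true => exact ⟨[], pvSplitF (q :: t') gs, rfl⟩
      | false =>
        obtain ⟨r, cs, h⟩ := ih q gs
        exact ⟨q :: r, cs, by simp only [pvSplitF]; rw [h]; rfl⟩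

theorem pvCutR_eq_splitF (gs : List Bool) : ∀ (l : List Int),
    l.length = gs.length + 1 → pvCutR l (pvSizesF gs 1) = pvSplitF l gs := by
  induction gs with
  | nil =>
    intro l hl
    obtain ⟨p, rfl⟩ : ∃ p, l = [p] := List.length_eq_one_iff.mp (by simpa using hl)
    simp only [pvSizesF, pvCutR]
    rw [PySem.List.slice_to _ (by norm_num)]
    simp [pvSplitF]
  | cons g gs ih =>
    intro l hl
    cases l with
    | nil => simp at hl
    | cons p t =>
      have ht : t.length = gs.length + 1 := by
        simp only [List.length_cons] at hl; omega
      cases g with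
      | true =>
        simp only [pvSizesF, pvCutR]
        rw [PySem.List.slice_to _ (by norm_num), PySem.List.slice_from _ (by norm_num)]
        simp only [Int.toNat_one, List.take_succ_cons, List.take_zero, List.drop_succ_cons,
          List.drop_zero]
        rw [ih t ht]
        rfl
      | false =>
        obtain ⟨m, ks, hh⟩ := pvSizesF_head gs 1
        simp only [pvSizesF]
        rw [pvSizesF_succ gs 1, hh]
        simp only [pvAddFirst, pvCutR]
        have e1 : (1 : Int) + (m : Int) + 1 = ((m + 2 : Nat) : Int) := by push_cast; ring
        have e2 : (1 : Int) + (m : Int) = ((m + 1 : Nat) : Int) := by push_cast; ring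
        rw [e1, PySem.List.slice_to_natCast, PySem.List.slice_from_natCast]
        have hstep : (p :: t).take (m + 2) = p :: t.take (m + 1) := by simp
        have hstep2 : (p :: t).drop (m + 2) = t.drop (m + 1) := by
          simp [List.drop_succ_cons]
        rw [hstep, hstep2]
        have hrec : pvCutR t (pvSizesF gs 1) = pvSplitF t gs := ih t ht
        rw [hh, e2] at hrec
        simp only [pvCutR, PySem.List.slice_to_natCast, PySem.List.slice_from_natCast] at hrec
        obtain ⟨q, t', rfl⟩ : ∃ q t', t = q :: t' := by
          cases t with
          | nil => simp at ht
          | cons q t' => exact ⟨q, t', rfl⟩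
        obtain ⟨r, cs, hsh⟩ := pvSplitF_shape q t' gs
        simp only [pvSplitF]
        rw [hsh] at hrec ⊢
        simp only [pvConsHead]
        cases hcut : pvCutR ((q :: t').drop (m + 1)) ks with
        | nil => rw [hcut] at hrec; simp_all
        | cons c cs' =>
          rw [hcut] at hrec
          injection hrec with h1 h2
          rw [h1, h2]

def pvConsFront (cc : List Int) : List (List Int) → List (List Int)
  | (_ :: r) :: cs => (cc ++ r) :: cs
  | _ => [cc]

theorem pvALoop_eq (eps : Int) (t : List Int) :
    ∀ (clusters : List (List Int)) (cc : List Int) (cp : Int),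
    pvALoop eps t clusters cc cp
      = clusters ++ pvConsFront cc (pvSplitF (cp :: t) (pvGapsR eps (cp :: t))) := by
  induction t with
  | nil => intro clusters cc cp; simp [pvALoop, pvGapsR, pvSplitF, pvConsFront]
  | cons p t' ih =>
    intro clusters cc cp
    obtain ⟨r, cs, hsh⟩ := pvSplitF_shape p t' (pvGapsR eps (p :: t'))
    by_cases h : p ≤ cp + eps
    · have hg : ¬ (cp + eps < p) := by omega
      rw [pvALoop, if_pos h, ih]
      simp only [pvGapsR, decide_eq_false hg, pvSplitF]
      rw [hsh]
      simp [pvConsHead, pvConsFront]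
    · have hg : cp + eps < p := by omega
      rw [pvALoop, if_neg h, ih]
      simp only [pvGapsR, decide_eq_true hg, pvSplitF]
      rw [hsh]
      simp [pvConsFront]

-- ===== VERDICT (by name: the statement is the Claim_ definition above) =====
theorem clusteringSliding_spec : Claim_equal_clusteringSliding := by
  intro points eps _ hpre
  unfold Spec_clusteringSliding clusteringSliding clusteringSliding_alt
  cases hs : PySem.List.sorted points (fun x => x) false with
  | nil =>
    have hperm := PySem.List.sorted_perm points (fun x => x) false
    rw [hs] at hperm
    exact absurd hperm.symm.eq_nil hpre
  | cons h t =>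
    have hne : (h :: t : List Int) ≠ [] := by simp
    simp only [if_neg hne]
    have hlen : (h :: t : List Int).length = (pvGapsR eps (h :: t)).length + 1 :=
      (pvGapsR_length eps _ hne).symm
    obtain ⟨r, cs, hsh⟩ := pvSplitF_shape h t (pvGapsR eps (h :: t))
    rw [pvALoop_eq, pvGapsB_eq, pvCut_foldl, pvSizes_foldl]
    simp only [List.nil_append]
    rw [pvCutR_eq_splitF _ _ hlen, hsh]
    simp [pvConsFront]
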